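-- pv_equiv track=rewrite | github.com/YoungHo-K/problem-solving | 프로그래머스/unrated/147354. 테이블 해시 함수/테이블 해시 함수.py | solution
-- ===== SOURCE A (Python) =====
-- import heapq
--
-- def solution(data, col, row_begin, row_end):
--     # if len(data) == 1:
--     #     return sum(data[0]) ^ sum(data[0])
--
--     sorted_data = list()
--     for row in data:
--         pivot = col - 1
--         new_data = [row[pivot], -row[0]] + row[1: pivot] + row[pivot + 1:]
--
--         heapq.heappush(sorted_data, new_data)
--
--     index = 0
--     answer = None
--     while sorted_data and (index < row_end):
--         data = heapq.heappop(sorted_data)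
--
--         index += 1
--         if index < row_begin:
--             continue
--
--         data[1] *= -1
--         mod_sum = 0
--         for val in data:
--             mod_sum += val % index
--
--         answer = mod_sum if answer is None else answer ^ mod_sum
--
--     return answer
-- ===== SOURCE B (Python) =====
-- def solution(data, col, row_begin, row_end):
--     pivot = col - 1
--     keys = sorted([row[pivot], -row[0]] + row[1:pivot] + row[pivot + 1:] for row in data)
--     answer = None
--     for index, key in enumerate(keys[:max(row_end, 0)], 1):
--         if index >= row_begin:
--             mod_sum = key[0] % index + (-key[1]) % index + sum(v % index for v in key[2:])
--             answer = mod_sum if answer is None else answer ^ mod_sum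
--     return answer
-- ===== Notes on version B (the rewrite author's own statement) =====
-- stated objective: simpler
-- what changed: Replaces A's heap (push all transformed rows, then pop-min one at a time inside a while loop with a continue-skip) by one stable sort of the transformed rows followed by a single enumerate pass over the row_begin..row_end window, with the hash computed directly from the key's components instead of mutating the popped row in place.
import Mathlib
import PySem

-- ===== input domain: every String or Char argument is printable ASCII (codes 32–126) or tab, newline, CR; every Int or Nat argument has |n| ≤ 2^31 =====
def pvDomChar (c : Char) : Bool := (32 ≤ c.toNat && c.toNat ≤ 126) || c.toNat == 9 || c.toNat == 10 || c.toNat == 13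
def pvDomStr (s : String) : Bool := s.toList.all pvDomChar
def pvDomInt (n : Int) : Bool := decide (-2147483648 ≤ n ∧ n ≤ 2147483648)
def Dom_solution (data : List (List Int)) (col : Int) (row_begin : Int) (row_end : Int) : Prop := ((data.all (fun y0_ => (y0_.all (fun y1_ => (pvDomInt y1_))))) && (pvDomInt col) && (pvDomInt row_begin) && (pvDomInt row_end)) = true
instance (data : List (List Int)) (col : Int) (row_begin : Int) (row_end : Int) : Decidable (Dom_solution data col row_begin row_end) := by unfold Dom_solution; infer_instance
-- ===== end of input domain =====

-- B replaces A's heap (push all transformed rows, pop-min one by one) by a single stable sort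
-- followed by one indexed pass over the row_begin..row_end window: simpler and more idiomatic.

-- ===== PORT A =====
-- A's transformed row: [row[pivot], -row[0]] + row[1:pivot] + row[pivot+1:]  (pivot = col-1;
-- indexing via pyGetD: inside Pre_ both indices are in range, Python-exact there)
def pvRowKeyA (col : Int) (row : List Int) : List Int :=
  [PySem.List.pyGetD row (col - 1) 0, -(PySem.List.pyGetD row 0 0)]
    ++ PySem.List.slice row (some 1) (some (col - 1))
    ++ PySem.List.slice row (some col) none

-- heapq modeled value-exactly: heappush adds the element to the collection, heappop removes the
-- FIRST minimal element under Python's list order (equal heap elements are equal Lean values,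
-- so which copy CPython's sift returns is unobservable in the popped VALUES).
def pvExtractMin : List (List Int) → Option (List Int × List (List Int))
  | [] => none
  | x :: xs =>
    match pvExtractMin xs with
    | none => some (x, [])
    | some (m, r) => if x ≤ m then some (x, xs) else some (m, x :: r)

-- data[1] *= -1 (A's transformed rows always have ≥ 2 elements; other shapes unreachable)
def pvNegSecond : List Int → List Int
  | a :: b :: t => a :: (-b) :: t
  | l => l

theorem pvExtractMin_eq_none {l : List (List Int)} : pvExtractMin l = none ↔ l = [] := by
  cases l with
  | nil => simp [pvExtractMin]
  | cons x xs =>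
    simp only [pvExtractMin]
    cases hx : pvExtractMin xs with
    | none => simp
    | some p => by_cases h : x ≤ p.1 <;> simp [h]

theorem pvExtractMin_length {l : List (List Int)} {m : List Int} {r : List (List Int)}
    (h : pvExtractMin l = some (m, r)) : r.length + 1 = l.length := by
  induction l generalizing m r with
  | nil => simp [pvExtractMin] at h
  | cons x xs ih =>
    simp only [pvExtractMin] at h
    cases hx : pvExtractMin xs with
    | none =>
      rw [hx] at h
      have hnil : xs = [] := pvExtractMin_eq_none.mp hx
      subst hnil
      simp only [Option.some.injEq, Prod.mk.injEq] at h
      rw [← h.2]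
      simp
    | some p =>
      obtain ⟨m', r'⟩ := p
      rw [hx] at h
      dsimp only at h
      by_cases hle : x ≤ m'
      · rw [if_pos hle] at h
        simp only [Option.some.injEq, Prod.mk.injEq] at h
        rw [← h.2]
        simp
      · rw [if_neg hle] at h
        simp only [Option.some.injEq, Prod.mk.injEq] at h
        have hlen := ih hx
        rw [← h.2]
        simp only [List.length_cons]
        omega

-- A's while-pop loop
def pvPopLoop (row_begin row_end : Int) (heap : List (List Int)) (index : Int)
    (answer : Option Int) : Option Int :=
  match h : pvExtractMin heap with
  | none => answer
  | some (d, rest) =>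
    if index < row_end then
      let index' := index + 1
      if index' < row_begin then pvPopLoop row_begin row_end rest index' answer
      else
        let d' := pvNegSecond d
        let mod_sum := d'.foldl (fun s v => s + PySem.Int.mod v index') 0
        pvPopLoop row_begin row_end rest index'
          (some (match answer with
                 | none => mod_sum
                 | some a => PySem.Int.bxor a mod_sum))
    else answer
termination_by heap.length
decreasing_by all_goals (have := pvExtractMin_length h; omega)

def solution (data : List (List Int)) (col : Int) (row_begin : Int) (row_end : Int) : Option Int :=
  let sorted_data := data.foldl (fun h row => h ++ [pvRowKeyA col row]) []
  pvPopLoop row_begin row_end sorted_data 0 none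

-- ===== PORT B =====
-- B's key: the same transformed row expression
def pvRowKeyB (col : Int) (row : List Int) : List Int :=
  [PySem.List.pyGetD row (col - 1) 0, -(PySem.List.pyGetD row 0 0)]
    ++ PySem.List.slice row (some 1) (some (col - 1))
    ++ PySem.List.slice row (some col) none

-- B's loop body over (index, key) pairs
def pvBBody (row_begin : Int) (answer : Option Int) (p : Int × List Int) : Option Int :=
  if p.1 ≥ row_begin then
    let key := p.2
    let mod_sum := PySem.Int.mod (PySem.List.pyGetD key 0 0) p.1
        + PySem.Int.mod (-(PySem.List.pyGetD key 1 0)) p.1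
        + ((PySem.List.slice key (some 2) none).map (fun v => PySem.Int.mod v p.1)).sum
    some (match answer with
          | none => mod_sum
          | some a => PySem.Int.bxor a mod_sum)
  else answer

def solution_alt (data : List (List Int)) (col : Int) (row_begin : Int) (row_end : Int) : Option Int :=
  let keys := PySem.List.sorted (data.map (pvRowKeyB col)) (fun k => k) false
  (PySem.List.enumerate (PySem.List.slice keys none (some (max row_end 0))) 1).foldl
    (pvBBody row_begin) none

-- ===== PRECONDITION & SPEC =====
-- Pre_ excludes exactly the inputs where Python A raises IndexError: a row on which
-- row[0] or row[col-1] is out of range.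
def Pre_solution (data : List (List Int)) (col : Int) (row_begin : Int) (row_end : Int) : Prop :=
  ∀ row ∈ data, row ≠ [] ∧ PySem.Raise.InRange row.length (col - 1)
instance (data : List (List Int)) (col : Int) (row_begin : Int) (row_end : Int) : Decidable (Pre_solution data col row_begin row_end) := by unfold Pre_solution; infer_instance

def pvWitness_solution : List (List Int) × Int × Int × Int := ([[2, 2, 6], [1, 5, 10], [4, 2, 9], [3, 8, 3]], 2, 2, 3)

def Spec_solution (data : List (List Int)) (col : Int) (row_begin : Int) (row_end : Int) (out : Option Int) : Prop := out = solution_alt data col row_begin row_end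
instance (data : List (List Int)) (col : Int) (row_begin : Int) (row_end : Int) (out : Option Int) : Decidable (Spec_solution data col row_begin row_end out) := by unfold Spec_solution; infer_instance

-- ===== CLAIM (what is proved, stated in full; the proofs are below) =====
def Claim_equal_solution : Prop := ∀ (data : List (List Int)) (col : Int) (row_begin : Int) (row_end : Int), Dom_solution data col row_begin row_end → Pre_solution data col row_begin row_end → Spec_solution data col row_begin row_end (solution data col row_begin row_end)

-- ===== LEMMAS AND PROOFS =====

theorem pvRowKey_eq : pvRowKeyA = pvRowKeyB := rfl

theorem pvExtractMin_perm {l : List (List Int)} {m : List Int} {r : List (List Int)}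
    (h : pvExtractMin l = some (m, r)) : (m :: r).Perm l := by
  induction l generalizing m r with
  | nil => simp [pvExtractMin] at h
  | cons x xs ih =>
    simp only [pvExtractMin] at h
    cases hx : pvExtractMin xs with
    | none =>
      rw [hx] at h
      have hnil : xs = [] := pvExtractMin_eq_none.mp hx
      subst hnil
      simp only [Option.some.injEq, Prod.mk.injEq] at h
      rw [← h.1, ← h.2]
    | some p =>
      obtain ⟨m', r'⟩ := p
      rw [hx] at h
      dsimp only at h
      by_cases hle : x ≤ m'
      · rw [if_pos hle] at h
        simp only [Option.some.injEq, Prod.mk.injEq] at h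
        rw [← h.1, ← h.2]
      · rw [if_neg hle] at h
        simp only [Option.some.injEq, Prod.mk.injEq] at h
        have hperm : (m' :: r').Perm xs := ih hx
        rw [← h.1, ← h.2]
        exact (List.Perm.swap x m' r').trans (hperm.cons x)

theorem pvExtractMin_min {l : List (List Int)} {m : List Int} {r : List (List Int)}
    (h : pvExtractMin l = some (m, r)) : ∀ y ∈ l, m ≤ y := by
  induction l generalizing m r with
  | nil => simp [pvExtractMin] at h
  | cons x xs ih =>
    simp only [pvExtractMin] at h
    cases hx : pvExtractMin xs with
    | none =>
      rw [hx] at h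
      have hnil : xs = [] := pvExtractMin_eq_none.mp hx
      subst hnil
      simp only [Option.some.injEq, Prod.mk.injEq] at h
      intro y hy
      simp only [List.mem_singleton] at hy
      rw [← h.1, hy]
    | some p =>
      obtain ⟨m', r'⟩ := p
      rw [hx] at h
      dsimp only at h
      have hmin : ∀ y ∈ xs, m' ≤ y := ih hx
      by_cases hle : x ≤ m'
      · rw [if_pos hle] at h
        simp only [Option.some.injEq, Prod.mk.injEq] at h
        intro y hy
        rcases List.mem_cons.mp hy with rfl | hy
        · rw [← h.1]
        · rw [← h.1]; exact le_trans hle (hmin y hy)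
      · rw [if_neg hle] at h
        simp only [Option.some.injEq, Prod.mk.injEq] at h
        intro y hy
        rcases List.mem_cons.mp hy with rfl | hy
        · rw [← h.1]; exact le_of_lt (lt_of_not_ge hle)
        · rw [← h.1]; exact hmin y hy

-- the core DecidableLT on List Int used by the ports equals the LinearOrder-derived one
theorem pvSortedBridge (l : List (List Int)) :
    PySem.List.sorted l (fun k => k) false
      = @PySem.List.sorted (List Int) (List Int) _
          (@LinearOrder.toDecidableLT (List Int) List.instLinearOrder) l (fun k => k) false :=
  congrArg (fun inst => @PySem.List.sorted (List Int) (List Int) _ inst l (fun k => k) false)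
    (funext fun _ => funext fun _ => Subsingleton.elim _ _)

-- sorted of l decomposes through extract-min
theorem pvSorted_extract {l : List (List Int)} {m : List Int} {r : List (List Int)}
    (h : pvExtractMin l = some (m, r)) :
    PySem.List.sorted l (fun k => k) false = m :: PySem.List.sorted r (fun k => k) false := by
  rw [pvSortedBridge l, pvSortedBridge r]
  apply PySem.List.eq_of_perm_of_pairwise_le_of_injective (fun k : List Int => k)
    (fun a b hab => hab)
  · exact (@PySem.List.sorted_perm (List Int) (List Int) _ (@LinearOrder.toDecidableLT (List Int) List.instLinearOrder) l (fun k => k) false).trans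
      ((((@PySem.List.sorted_perm (List Int) (List Int) _ (@LinearOrder.toDecidableLT (List Int) List.instLinearOrder) r (fun k => k) false).cons m).trans
        (pvExtractMin_perm h)).symm)
  · exact PySem.List.sorted_pairwise l _
  · refine List.Pairwise.cons ?_ (PySem.List.sorted_pairwise r _)
    intro y hy
    have hyr : y ∈ r := (@PySem.List.mem_sorted (List Int) (List Int) _ (@LinearOrder.toDecidableLT (List Int) List.instLinearOrder) r (fun k => k) false y).mp hy
    exact pvExtractMin_min h y ((pvExtractMin_perm h).mem_iff.mp (List.mem_cons_of_mem m hyr))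

-- A's head-based loop over the already-sorted list
def pvSeqLoop (row_begin row_end : Int) : List (List Int) → Int → Option Int → Option Int
  | [], _, answer => answer
  | d :: rest, index, answer =>
    if index < row_end then
      let index' := index + 1
      if index' < row_begin then pvSeqLoop row_begin row_end rest index' answer
      else
        let d' := pvNegSecond d
        let mod_sum := d'.foldl (fun s v => s + PySem.Int.mod v index') 0
        pvSeqLoop row_begin row_end rest index'
          (some (match answer with
                 | none => mod_sum
                 | some a => PySem.Int.bxor a mod_sum))
    else answer

theorem pvPopLoop_eq_seq (rb re : Int) :
    ∀ (n : Nat) (l : List (List Int)), l.length ≤ n → ∀ (i : Int) (ans : Option Int),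
    pvPopLoop rb re l i ans = pvSeqLoop rb re (PySem.List.sorted l (fun k => k) false) i ans := by
  intro n
  induction n with
  | zero =>
    intro l hl i ans
    have hnil : l = [] := List.length_eq_zero_iff.mp (Nat.le_zero.mp hl)
    subst hnil
    rw [pvPopLoop]
    rw [(PySem.List.sorted_eq_nil_iff ([] : List (List Int)) (fun k => k) false).mpr rfl]
    simp [pvExtractMin, pvSeqLoop]
  | succ n ih =>
    intro l hl i ans
    rw [pvPopLoop]
    cases h : pvExtractMin l with
    | none =>
      have hnil : l = [] := pvExtractMin_eq_none.mp h
      subst hnil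
      rw [(PySem.List.sorted_eq_nil_iff ([] : List (List Int)) (fun k => k) false).mpr rfl]
      simp [pvSeqLoop]
    | some p =>
      obtain ⟨d, rest⟩ := p
      have hlen := pvExtractMin_length h
      rw [pvSorted_extract h]
      dsimp only
      rw [pvSeqLoop]
      by_cases hre : i < re
      · rw [if_pos hre, if_pos hre]
        by_cases hrb : i + 1 < rb
        · rw [if_pos hrb, if_pos hrb]
          exact ih rest (by omega) (i + 1) ans
        · rw [if_neg hrb, if_neg hrb]
          exact ih rest (by omega) (i + 1) _
      · rw [if_neg hre, if_neg hre]

theorem pvSeq_eq_fold (rb re : Int) :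
    ∀ (s : List (List Int)), (∀ k ∈ s, ∃ a b t, k = a :: b :: t) →
    ∀ (i : Int) (ans : Option Int),
    pvSeqLoop rb re s i ans =
      (PySem.List.enumerate (s.take (re - i).toNat) (i + 1)).foldl (pvBBody rb) ans := by
  intro s
  induction s with
  | nil => intro _ i ans; simp [pvSeqLoop, PySem.List.enumerate_nil]
  | cons d rest ih =>
    intro hshape i ans
    obtain ⟨a, b, t, rfl⟩ := hshape d List.mem_cons_self
    have hrest := fun k hk => hshape k (List.mem_cons_of_mem _ hk)
    rw [pvSeqLoop]
    by_cases hre : i < re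
    · have htn : (re - i).toNat = (re - (i + 1)).toNat + 1 := by omega
      rw [htn, if_pos hre]
      simp only [List.take_succ_cons, PySem.List.enumerate_cons, List.foldl_cons]
      have hS : PySem.Int.mod (PySem.List.pyGetD (a :: b :: t) 0 0) (i + 1)
            + PySem.Int.mod (-(PySem.List.pyGetD (a :: b :: t) 1 0)) (i + 1)
            + ((PySem.List.slice (a :: b :: t) (some 2) none).map
                (fun v => PySem.Int.mod v (i + 1))).sum
          = (pvNegSecond (a :: b :: t)).foldl (fun s v => s + PySem.Int.mod v (i + 1)) 0 := by
        rw [PySem.List.pyGetD_zero_cons]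
        have h1 : PySem.List.pyGetD (a :: b :: t) 1 0 = b := by simp [pysem]
        rw [h1, PySem.List.slice_from _ (by omega)]
        show _ = (a :: -b :: t).foldl _ 0
        rw [PySem.List.foldl_add]
        have hdrop : List.drop (Int.toNat 2) (a :: b :: t) = t := rfl
        rw [hdrop]
        simp only [List.map_cons, List.sum_cons]
        ring
      by_cases hrb : i + 1 < rb
      · rw [if_pos hrb, ih hrest (i + 1) ans]
        congr 1
        simp only [pvBBody]
        rw [if_neg (by omega)]
      · rw [if_neg hrb, ih hrest (i + 1) _]
        congr 1
        simp only [pvBBody, hS]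
        rw [if_pos (by omega)]
    · have htn : (re - i).toNat = 0 := by omega
      rw [htn, if_neg hre]
      simp [PySem.List.enumerate_nil]

-- ===== VERDICT (by name: the statement is the Claim_ definition above) =====
theorem solution_spec : Claim_equal_solution := by
  intro data col rb re hdom hpre
  unfold Spec_solution solution solution_alt
  dsimp only
  rw [show (data.foldl (fun h row => h ++ [pvRowKeyA col row]) []) = data.map (pvRowKeyA col) from
    by simpa using PySem.List.foldl_append_singleton_eq_map (pvRowKeyA col) data []]
  rw [pvPopLoop_eq_seq rb re (data.map (pvRowKeyA col)).length _ le_rfl 0 none]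
  rw [pvSeq_eq_fold rb re _ ?hshape 0 none]
  case hshape =>
    intro k hk
    have hmem : k ∈ data.map (pvRowKeyA col) := (PySem.List.mem_sorted _ _ false k).mp hk
    obtain ⟨row, _, rfl⟩ := List.mem_map.mp hmem
    exact ⟨_, _, _, rfl⟩
  rw [← pvRowKey_eq]
  rw [PySem.List.slice_to _ (by omega : (0 : Int) ≤ max re 0)]
  have hmax : (max re 0).toNat = (re - 0).toNat := by omega
  rw [hmax]
  norm_num
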